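-- pv_equiv track=rewrite | github.com/scottmm374/My_Advent_solutions | Advent/2022/Day11MonkeyintheMiddle/main.py | check_monkey_one
-- ===== SOURCE A (Python) =====
-- def check_monkey_one(arr_0, arr_1, arr_2, count):
--
--     temp_1 = arr_0
--     temp_4 = arr_1
--     temp_6 = arr_2
--     m_one = count
--
--     while len(temp_1) > 0:
--         m_one +=1
--         item = temp_1.pop(0)
--         new = item + 5
--         # rounded = math.floor(new / 3)
--         if new % 11 == 0:
--             temp_6.append(new)
--         else:
--             temp_4.append(new)
--     return(temp_1, temp_4, temp_6, m_one)
-- ===== SOURCE B (Python) =====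
-- def check_monkey_one(arr_0, arr_1, arr_2, count):
--     m_one = count + len(arr_0)
--     new = [x + 5 for x in arr_0]
--     arr_2.extend(v for v in new if v % 11 == 0)
--     arr_1.extend(v for v in new if v % 11 != 0)
--     arr_0.clear()
--     return (arr_0, arr_1, arr_2, m_one)
-- ===== Notes on version B (the rewrite author's own statement) =====
-- stated objective: faster
-- what changed: Replaces the destructive pop(0)-while-loop (quadratic on Python lists) with a closed-form count, one map, and two filtered extends that partition the shifted items.
import Mathlib
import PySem

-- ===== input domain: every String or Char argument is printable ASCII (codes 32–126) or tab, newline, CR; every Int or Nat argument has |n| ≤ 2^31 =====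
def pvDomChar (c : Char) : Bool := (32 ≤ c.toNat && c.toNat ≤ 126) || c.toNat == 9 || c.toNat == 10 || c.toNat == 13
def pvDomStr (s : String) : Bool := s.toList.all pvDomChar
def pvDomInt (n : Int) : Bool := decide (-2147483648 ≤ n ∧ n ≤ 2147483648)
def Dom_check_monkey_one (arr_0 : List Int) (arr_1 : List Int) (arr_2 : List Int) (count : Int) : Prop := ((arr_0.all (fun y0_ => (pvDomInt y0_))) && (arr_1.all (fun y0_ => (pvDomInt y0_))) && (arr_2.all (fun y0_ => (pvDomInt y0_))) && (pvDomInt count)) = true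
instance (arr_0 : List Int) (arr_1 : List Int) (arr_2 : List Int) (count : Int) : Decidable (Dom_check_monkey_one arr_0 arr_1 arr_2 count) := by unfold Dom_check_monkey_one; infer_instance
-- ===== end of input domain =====

-- B replaces A's destructive pop(0) while-loop with a closed-form count plus a map and two
-- filtered extends; equivalence is about the RETURN value (both Pythons also mutate the lists).

-- ===== PORT A =====
-- the while loop: pop(0) from temp_1, append 'new' to temp_6 or temp_4, bump m_one
def checkMonkeyOneLoop : List Int → List Int → List Int → Int → List Int × List Int × List Int × Int
  | [], temp_4, temp_6, m_one => ([], temp_4, temp_6, m_one)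
  | item :: rest, temp_4, temp_6, m_one =>
    let new := item + 5
    if PySem.Int.mod new 11 == 0 then
      checkMonkeyOneLoop rest temp_4 (temp_6 ++ [new]) (m_one + 1)
    else
      checkMonkeyOneLoop rest (temp_4 ++ [new]) temp_6 (m_one + 1)

def check_monkey_one (arr_0 : List Int) (arr_1 : List Int) (arr_2 : List Int) (count : Int) : List Int × List Int × List Int × Int :=
  checkMonkeyOneLoop arr_0 arr_1 arr_2 count

-- ===== PORT B =====
def check_monkey_one_alt (arr_0 : List Int) (arr_1 : List Int) (arr_2 : List Int) (count : Int) : List Int × List Int × List Int × Int :=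
  let m_one := count + arr_0.length
  let new := arr_0.map (fun x => x + 5)
  let a2 := arr_2 ++ new.filter (fun v => PySem.Int.mod v 11 == 0)
  let a1 := arr_1 ++ new.filter (fun v => PySem.Int.mod v 11 != 0)
  ([], a1, a2, m_one)

-- ===== PRECONDITION & SPEC =====
def Spec_check_monkey_one (arr_0 : List Int) (arr_1 : List Int) (arr_2 : List Int) (count : Int) (out : List Int × List Int × List Int × Int) : Prop := out = check_monkey_one_alt arr_0 arr_1 arr_2 count
instance (arr_0 : List Int) (arr_1 : List Int) (arr_2 : List Int) (count : Int) (out : List Int × List Int × List Int × Int) : Decidable (Spec_check_monkey_one arr_0 arr_1 arr_2 count out) := by unfold Spec_check_monkey_one; infer_instance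

-- ===== CLAIM (what is proved, stated in full; the proofs are below) =====
def Claim_equal_check_monkey_one : Prop := ∀ (arr_0 : List Int) (arr_1 : List Int) (arr_2 : List Int) (count : Int), Dom_check_monkey_one arr_0 arr_1 arr_2 count → Spec_check_monkey_one arr_0 arr_1 arr_2 count (check_monkey_one arr_0 arr_1 arr_2 count)

-- ===== LEMMAS AND PROOFS =====

-- loop invariant: the loop appends the two filtered halves and adds the length
theorem checkMonkeyOneLoop_eq (xs : List Int) :
    ∀ (t4 t6 : List Int) (m : Int),
      checkMonkeyOneLoop xs t4 t6 m =
        ([], t4 ++ (xs.map (fun x => x + 5)).filter (fun v => PySem.Int.mod v 11 != 0),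
             t6 ++ (xs.map (fun x => x + 5)).filter (fun v => PySem.Int.mod v 11 == 0),
             m + xs.length) := by
  induction xs with
  | nil => intro t4 t6 m; simp [checkMonkeyOneLoop]
  | cons x rest ih =>
    intro t4 t6 m
    simp [checkMonkeyOneLoop, ih, List.filter_cons]
    by_cases h : (5 + x) % 11 = 0
    · simp [Int.dvd_iff_emod_eq_zero, add_comm x 5, h]
      ring
    · simp [Int.dvd_iff_emod_eq_zero, add_comm x 5, h]
      ring

-- ===== VERDICT (by name: the statement is the Claim_ definition above) =====
theorem check_monkey_one_spec : Claim_equal_check_monkey_one := by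
  intro arr_0 arr_1 arr_2 count _
  unfold Spec_check_monkey_one check_monkey_one check_monkey_one_alt
  rw [checkMonkeyOneLoop_eq]
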